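-- pv_equiv track=rewrite | github.com/happysmileboy/piro | python-hw/8-20.py | mask_security_number
-- ===== SOURCE A (Python) =====
-- def mask_security_number(security_number):
--     #스트링으로 받고 문자열로 바꾼다.
--     list_number = list(security_number)
--     #문자열의 끝 4개를 반복문으로 *로 바꾼다.
--     for i in range(len(list_number)):# 0 ~ 13
--         list_number[(len(list_number) - 1 - i)] = '*'
--         if i > 2:
--             break
--     #리스트를 다시 스트링으로 바꾼다.
--     result = ""
--     for i in list_number:
--         result = result + i
--
--     return result
-- ===== SOURCE B (Python) =====
-- def mask_security_number(security_number):
--     n = len(security_number)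
--     k = min(4, n)
--     return security_number[:n - k] + '*' * k
-- ===== Notes on version B (the rewrite author's own statement) =====
-- stated objective: faster
-- what changed: Replaces the index-from-the-end mutation loop with break and the quadratic character-by-character string-concatenation rebuild loop by a closed-form slice: keep the first n - min(4, n) characters and append min(4, n) asterisks.
import Mathlib
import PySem

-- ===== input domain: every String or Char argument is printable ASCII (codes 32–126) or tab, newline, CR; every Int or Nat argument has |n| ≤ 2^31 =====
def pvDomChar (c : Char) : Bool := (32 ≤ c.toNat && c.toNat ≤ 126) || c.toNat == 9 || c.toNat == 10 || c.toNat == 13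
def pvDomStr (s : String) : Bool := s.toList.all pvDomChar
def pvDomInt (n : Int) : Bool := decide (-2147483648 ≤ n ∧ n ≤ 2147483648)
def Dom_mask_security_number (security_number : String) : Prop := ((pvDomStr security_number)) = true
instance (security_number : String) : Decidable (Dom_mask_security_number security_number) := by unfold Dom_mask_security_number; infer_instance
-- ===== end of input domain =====

-- B replaces A's end-index mutation loop with break and its character-by-character
-- string-concatenation rebuild loop by a closed-form slice plus '*' * min(4, n).

-- ===== PORT A =====
-- the first loop: for i in range(len(list_number)): set index len-1-i to '*'; break once i > 2
def maskLoopA (l : List Char) (i : Nat) : List Char :=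
  if i < l.length then
    let l' := l.set (l.length - 1 - i) '*'
    if i > 2 then l' else maskLoopA l' (i + 1)
  else l
termination_by l.length - i
decreasing_by simp [List.length_set]; omega

def mask_security_number (security_number : String) : String :=
  let list_number := security_number.toList
  let list_number := maskLoopA list_number 0
  -- result = ""; for i in list_number: result = result + i
  String.mk (list_number.foldl (fun result c => result ++ [c]) [])

-- ===== PORT B =====
def mask_security_number_alt (security_number : String) : String :=
  let n := security_number.toList.length
  let k := min 4 n
  String.mk (security_number.toList.take (n - k) ++ List.replicate k '*')

-- ===== PRECONDITION & SPEC =====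
def Spec_mask_security_number (security_number : String) (out : String) : Prop := out = mask_security_number_alt security_number
instance (security_number : String) (out : String) : Decidable (Spec_mask_security_number security_number out) := by unfold Spec_mask_security_number; infer_instance

-- ===== CLAIM (what is proved, stated in full; the proofs are below) =====
def Claim_equal_mask_security_number : Prop := ∀ (security_number : String), Dom_mask_security_number security_number → Spec_mask_security_number security_number (mask_security_number security_number)

-- ===== LEMMAS AND PROOFS =====
theorem foldl_app_singleton (l acc : List Char) :
    l.foldl (fun result c => result ++ [c]) acc = acc ++ l := by
  induction l generalizing acc with
  | nil => simp
  | cons a t ih => simp [List.foldl, ih]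

theorem maskLoopA_big (l : List Char) (h : 4 ≤ l.length) :
    maskLoopA l 0 =
      ((((l.set (l.length - 1) '*').set (l.length - 2) '*').set (l.length - 3) '*').set
        (l.length - 4) '*') := by
  rw [maskLoopA]; simp only [List.length_set]
  rw [maskLoopA]; simp only [List.length_set]
  rw [maskLoopA]; simp only [List.length_set]
  rw [maskLoopA]
  have h0 : 0 < l.length := by omega
  have h1 : 1 < l.length := by omega
  have h2 : 2 < l.length := by omega
  have h3 : 3 < l.length := by omega
  have e2 : l.length - 1 - 1 = l.length - 2 := by omega
  have e3 : l.length - 1 - 2 = l.length - 3 := by omega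
  have e4 : l.length - 1 - 3 = l.length - 4 := by omega
  simp [h0, h1, h2, h3, e2, e3, e4]

theorem set4_take (l : List Char) (h : 4 ≤ l.length) :
    (((l.set (l.length - 1) '*').set (l.length - 2) '*').set (l.length - 3) '*').set
        (l.length - 4) '*' = l.take (l.length - 4) ++ List.replicate 4 '*' := by
  apply List.ext_getElem
  · simp [List.length_set]
    omega
  · intro i h1 h2
    simp only [List.length_set] at h1 h2
    simp only [List.getElem_set]
    by_cases hc : i < l.length - 4
    · have ht : i < (l.take (l.length - 4)).length := by simp; omega
      rw [List.getElem_append_left ht]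
      rw [if_neg (by omega), if_neg (by omega), if_neg (by omega), if_neg (by omega),
        List.getElem_take]
    · have ht : (l.take (l.length - 4)).length ≤ i := by simp; omega
      rw [List.getElem_append_right ht]
      simp only [List.getElem_replicate]
      split_ifs <;> first | rfl | omega

theorem maskLoopA_spec (l : List Char) :
    maskLoopA l 0 = l.take (l.length - min 4 l.length) ++ List.replicate (min 4 l.length) '*' := by
  match l with
  | [] => rw [maskLoopA]; simp
  | [a] => simp [maskLoopA]
  | [a, b] => simp [maskLoopA]
  | [a, b, c] => simp [maskLoopA]
  | a :: b :: c :: d :: t =>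
    have h4 : 4 ≤ (a :: b :: c :: d :: t).length := by simp
    have hmin : min 4 (a :: b :: c :: d :: t).length = 4 := by simp
    rw [maskLoopA_big _ h4, hmin, set4_take _ h4]

-- ===== VERDICT (by name: the statement is the Claim_ definition above) =====
theorem mask_security_number_spec : Claim_equal_mask_security_number := by
  intro s _
  show mask_security_number s = mask_security_number_alt s
  simp only [mask_security_number, mask_security_number_alt, foldl_app_singleton,
    maskLoopA_spec, List.nil_append]
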